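-- pv_equiv track=rewrite | github.com/rtehok/perso-python | leetcode/2389_longest_subsequence_with_limited_sum.py | answerQueriesGreedy
-- ===== SOURCE A (Python) =====
-- from typing import List
--
-- def answerQueriesGreedy(nums: List[int], queries: List[int]) -> List[int]:
--     # "A subsequence is an array that can be derived from another array
--     # by deleting some or no elements without changing the order of the remaining elements."
--     # BUT it does not matter that doing 1 + 2 + 3 == 2 + 1 + 3 == 3 + 2 + 1 == 3 + 1 + 2 == ...
--     nums.sort()
--     res = []
--
--     for query in queries:
--         count = 0
--         for num in nums:
--             if query >= num:
--                 query -= num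
--                 count += 1
--             else:
--                 break
--         res.append(count)
--
--     return res
-- ===== SOURCE B (Python) =====
-- from bisect import bisect_right
-- from itertools import accumulate
-- from typing import List
--
-- def answerQueriesGreedy(nums: List[int], queries: List[int]) -> List[int]:
--     # NOTE: like A, this sorts `nums` in place (same observable mutation).
--     nums.sort()
--     # running max of the prefix sums: a nondecreasing envelope, so bisect_right
--     # gives the length of the longest prefix whose partial sums all stay <= query
--     # (exactly where A's greedy loop breaks), even with negative numbers.
--     env = list(accumulate(accumulate(nums), max))
--     return [bisect_right(env, q) for q in queries]
-- ===== Notes on version B (the rewrite author's own statement) =====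
-- stated objective: faster
-- what changed: Replaces the per-query greedy rescan of the sorted array by a once-computed monotone envelope (running max of prefix sums) queried with bisect_right.
import Mathlib
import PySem

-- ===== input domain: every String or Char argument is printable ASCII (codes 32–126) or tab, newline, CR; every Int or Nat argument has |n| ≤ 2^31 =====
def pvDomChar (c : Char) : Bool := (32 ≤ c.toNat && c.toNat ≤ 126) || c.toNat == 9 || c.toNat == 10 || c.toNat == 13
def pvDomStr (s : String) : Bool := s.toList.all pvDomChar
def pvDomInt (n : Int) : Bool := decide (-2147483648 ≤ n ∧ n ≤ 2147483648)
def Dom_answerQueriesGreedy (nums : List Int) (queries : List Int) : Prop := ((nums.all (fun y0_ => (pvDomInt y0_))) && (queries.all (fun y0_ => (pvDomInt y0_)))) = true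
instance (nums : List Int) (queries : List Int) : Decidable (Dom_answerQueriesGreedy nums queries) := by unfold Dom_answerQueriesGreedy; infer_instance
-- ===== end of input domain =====

-- B replaces A's per-query greedy rescan with a once-built running-max-of-prefix-sums
-- envelope plus bisect_right per query (asymptotically faster; measured by the check).
-- Both programs sort `nums` in place; the equivalence proved is about the return value.

-- ===== PORT A =====
-- A's inner loop: consume sorted nums while query >= num, counting; break otherwise.
def pvGreedyCount (q : Int) : List Int → Int
  | [] => 0
  | n :: ns => if q ≥ n then pvGreedyCount (q - n) ns + 1 else 0

def answerQueriesGreedy (nums : List Int) (queries : List Int) : List Int :=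
  let s := PySem.List.sorted nums (fun x => x) false
  queries.map (fun q => pvGreedyCount q s)

-- ===== PORT B =====
-- itertools.accumulate(nums) (running sum, no initial element)
def pvAccSum (s : Int) : List Int → List Int
  | [] => []
  | x :: xs => (s + x) :: pvAccSum (s + x) xs

-- itertools.accumulate(ps, max) (running max, no initial element)
def pvRunMax (c : Int) : List Int → List Int
  | [] => []
  | x :: xs => (max c x) :: pvRunMax (max c x) xs

def pvAccMax : List Int → List Int
  | [] => []
  | x :: xs => x :: pvRunMax x xs

-- bisect.bisect_right(env, q) on the (nondecreasing) envelope, ported by its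
-- library contract: the number of leading elements ≤ q.
def pvBisectRight (env : List Int) (q : Int) : Int :=
  ((env.takeWhile (fun p => decide (p ≤ q))).length : Int)

def answerQueriesGreedy_alt (nums : List Int) (queries : List Int) : List Int :=
  let s := PySem.List.sorted nums (fun x => x) false
  let env := pvAccMax (pvAccSum 0 s)
  queries.map (fun q => pvBisectRight env q)

-- ===== PRECONDITION & SPEC =====
def Spec_answerQueriesGreedy (nums : List Int) (queries : List Int) (out : List Int) : Prop := out = answerQueriesGreedy_alt nums queries
instance (nums : List Int) (queries : List Int) (out : List Int) : Decidable (Spec_answerQueriesGreedy nums queries out) := by unfold Spec_answerQueriesGreedy; infer_instance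

-- ===== CLAIM (what is proved, stated in full; the proofs are below) =====
def Claim_equal_answerQueriesGreedy : Prop := ∀ (nums : List Int) (queries : List Int), Dom_answerQueriesGreedy nums queries → Spec_answerQueriesGreedy nums queries (answerQueriesGreedy nums queries)

-- ===== LEMMAS AND PROOFS =====

-- the running max does not change where takeWhile (· ≤ q) stops, as long as c ≤ q
theorem pv_takeWhile_runMax (q : Int) : ∀ (ps : List Int) (c : Int), c ≤ q →
    ((pvRunMax c ps).takeWhile (fun p => decide (p ≤ q))).length
      = (ps.takeWhile (fun p => decide (p ≤ q))).length := by
  intro ps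
  induction ps with
  | nil => intro c _; simp [pvRunMax]
  | cons x xs ih =>
    intro c hc
    by_cases hx : x ≤ q
    · have hm : max c x ≤ q := by omega
      simp [pvRunMax, List.takeWhile, hx, hm, ih _ hm]
    · have hm : ¬ (max c x ≤ q) := by omega
      simp [pvRunMax, List.takeWhile, hx, hm]

theorem pv_takeWhile_accMax (q : Int) (ps : List Int) :
    ((pvAccMax ps).takeWhile (fun p => decide (p ≤ q))).length
      = (ps.takeWhile (fun p => decide (p ≤ q))).length := by
  cases ps with
  | nil => simp [pvAccMax]
  | cons x xs =>
    by_cases hx : x ≤ q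
    · simp [pvAccMax, List.takeWhile, hx, pv_takeWhile_runMax q xs x hx]
    · simp [pvAccMax, List.takeWhile, hx]

-- A's greedy count equals the number of leading prefix sums ≤ q
theorem pv_greedy_eq_prefix (q : Int) : ∀ (xs : List Int) (s : Int),
    pvGreedyCount (q - s) xs
      = (((pvAccSum s xs).takeWhile (fun p => decide (p ≤ q))).length : Int) := by
  intro xs
  induction xs with
  | nil => intro s; simp [pvGreedyCount, pvAccSum]
  | cons x xs ih =>
    intro s
    by_cases hx : q - s ≥ x
    · have hp : s + x ≤ q := by omega
      have := ih (s + x)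
      have he : q - s - x = q - (s + x) := by ring
      simp [pvGreedyCount, pvAccSum, hx, hp, he, this]
    · have hp : ¬ (s + x ≤ q) := by omega
      simp [pvGreedyCount, pvAccSum, hx, hp]

theorem pv_count_eq_bisect (q : Int) (xs : List Int) :
    pvGreedyCount q xs = pvBisectRight (pvAccMax (pvAccSum 0 xs)) q := by
  have h := pv_greedy_eq_prefix q xs 0
  simp only [sub_zero] at h
  simp [pvBisectRight, pv_takeWhile_accMax, h]

-- ===== VERDICT (by name: the statement is the Claim_ definition above) =====
theorem answerQueriesGreedy_spec : Claim_equal_answerQueriesGreedy := by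
  intro nums queries _
  unfold Spec_answerQueriesGreedy answerQueriesGreedy answerQueriesGreedy_alt
  simp [pv_count_eq_bisect]
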